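-- pv_equiv track=rewrite | github.com/GuilhermeDomiciano/poc-ai-pr-bot | backend/infrastructure/observability/workflow_observer.py | classify_change_scope
-- ===== SOURCE A (Python) =====
-- def classify_change_scope(files_map: dict[str, str]) -> str:
--     has_backend = any(path.startswith("backend/") for path in files_map)
--     has_frontend = any(path.startswith("frontend/") for path in files_map)
--
--     if has_backend and has_frontend:
--         return "fullstack"
--     if has_backend:
--         return "backend_only"
--     if has_frontend:
--         return "frontend_only"
--     return "unknown"
-- ===== SOURCE B (Python) =====
-- def classify_change_scope(files_map: dict[str, str]) -> str:
--     mask = 0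
--     for path in files_map:
--         if path.startswith("backend/"):
--             mask |= 1
--         if path.startswith("frontend/"):
--             mask |= 2
--         if mask == 3:
--             break
--     return ("unknown", "backend_only", "frontend_only", "fullstack")[mask]
-- ===== Notes on version B (the rewrite author's own statement) =====
-- stated objective: alternative
-- what changed: Replaces two separate any() scans and a four-way branch chain with a single early-exiting pass that accumulates a 2-bit mask and a direct table lookup indexed by the mask.
import Mathlib
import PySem

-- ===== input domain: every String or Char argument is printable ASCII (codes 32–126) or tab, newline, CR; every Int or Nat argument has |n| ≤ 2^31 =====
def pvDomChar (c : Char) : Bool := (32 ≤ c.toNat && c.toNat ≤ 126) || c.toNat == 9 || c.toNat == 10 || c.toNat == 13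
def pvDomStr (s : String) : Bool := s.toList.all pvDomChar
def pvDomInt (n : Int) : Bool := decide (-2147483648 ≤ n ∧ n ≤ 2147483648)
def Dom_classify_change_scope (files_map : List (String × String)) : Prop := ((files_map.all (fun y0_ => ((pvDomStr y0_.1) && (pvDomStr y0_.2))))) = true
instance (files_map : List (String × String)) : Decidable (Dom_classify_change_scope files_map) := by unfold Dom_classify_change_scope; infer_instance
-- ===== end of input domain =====

-- B replaces A's two any() scans and four-way branch chain by a single early-exiting pass that
-- accumulates a 2-bit mask and a table lookup (alternative decomposition, same cost).


-- ===== PORT A =====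
def classify_change_scope (files_map : List (String × String)) : String :=
  let has_backend := files_map.any (fun kv => PySem.Str.startswith kv.1 "backend/")
  let has_frontend := files_map.any (fun kv => PySem.Str.startswith kv.1 "frontend/")
  if has_backend && has_frontend then "fullstack"
  else if has_backend then "backend_only"
  else if has_frontend then "frontend_only"
  else "unknown"

-- ===== PORT B =====
-- single pass accumulating a 2-bit mask, breaking once both bits are set
def csMaskLoop : List (String × String) → Nat → Nat
  | [], mask => mask
  | kv :: rest, mask =>
    let mask := if PySem.Str.startswith kv.1 "backend/" then mask ||| 1 else mask
    let mask := if PySem.Str.startswith kv.1 "frontend/" then mask ||| 2 else mask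
    if mask == 3 then mask else csMaskLoop rest mask

def csTable (mask : Nat) : String :=
  match mask with
  | 0 => "unknown"
  | 1 => "backend_only"
  | 2 => "frontend_only"
  | _ => "fullstack"

def classify_change_scope_alt (files_map : List (String × String)) : String :=
  csTable (csMaskLoop files_map 0)

-- ===== PRECONDITION & SPEC =====
def Spec_classify_change_scope (files_map : List (String × String)) (out : String) : Prop := out = classify_change_scope_alt files_map
instance (files_map : List (String × String)) (out : String) : Decidable (Spec_classify_change_scope files_map out) := by unfold Spec_classify_change_scope; infer_instance

-- ===== CLAIM (what is proved, stated in full; the proofs are below) =====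
def Claim_equal_classify_change_scope : Prop := ∀ (files_map : List (String × String)), Dom_classify_change_scope files_map → Spec_classify_change_scope files_map (classify_change_scope files_map)

-- ===== LEMMAS AND PROOFS =====

-- ===== VERDICT (by name: the statement is the Claim_ definition above) =====
def csEnc (b f : Bool) : Nat := (cond b 1 0) + (cond f 2 0)

theorem csMaskLoop_enc (l : List (String × String)) (hb hf : Bool) :
    csMaskLoop l (csEnc hb hf) =
      csEnc (hb || l.any (fun kv => PySem.Str.startswith kv.1 "backend/"))
            (hf || l.any (fun kv => PySem.Str.startswith kv.1 "frontend/")) := by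
  induction l generalizing hb hf with
  | nil => simp [csMaskLoop]
  | cons kv rest ih =>
    have ih10 := ih true false
    have ih01 := ih false true
    have ih11 := ih true true
    cases hB : PySem.Str.startswith kv.1 "backend/" <;>
    cases hF : PySem.Str.startswith kv.1 "frontend/" <;>
    cases hb <;> cases hf <;>
      simp_all [csMaskLoop, csEnc]

theorem classify_change_scope_spec : Claim_equal_classify_change_scope := by
  intro files_map _
  unfold Spec_classify_change_scope classify_change_scope classify_change_scope_alt
  have h := csMaskLoop_enc files_map false false
  simp only [csEnc, Bool.false_or, cond] at h
  rw [h]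
  cases files_map.any (fun kv => PySem.Str.startswith kv.1 "backend/") <;>
  cases files_map.any (fun kv => PySem.Str.startswith kv.1 "frontend/") <;>
    simp [csTable]
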